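-- pv_equiv track=rewrite | github.com/mattdoug604/Rosalind | 2_bioinformatics_stronghold/rosalind_OSYM.py | align_to_symbols
-- ===== SOURCE A (Python) =====
-- def global_alignment(s, t):
--     # Initialize the score matrix.
--     S = [[0 for j in range(len(t) + 1)] for i in range(len(s) + 1)]
--
--     # Each cell in the first row and column recieves a gap penalty.
--     for i in range(1, len(s) + 1):
--         S[i][0] = -i
--     for j in range(1, len(t) + 1):
--         S[0][j] = -j
--
--     # Fill in the score matrix.
--     for i in range(1, len(s) + 1):
--         for j in range(1, len(t) + 1):
--             if i == len(s) + 1 and j == len(t) + 1: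
--                 S[i][j] = S[i - 1][j - 1] + [-1, 1][s[i - 1] == t[j - 1]]
--             else:
--                 S[i][j] = max(
--                     [
--                         S[i - 1][j - 1] + [1, -1][s[i - 1] != t[j - 1]],
--                         S[i - 1][j] - 1,
--                         S[i][j - 1] - 1,
--                     ]
--                 )
--
--     # Return the alignment matrix
--     return S
--
-- def align_to_symbols(s, t):
--     # Will be used to hold the sum of the alignment scores.
--     total = 0
--     # Initialize the best score as some arbitrary small value.
--     best = -(len(s) + len(t))
--
--     # Create one alignment matrix of s and t, and one of s and t reversed.
--     prefix_matrix = global_alignment(s, t)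
--     suffix_matrix = global_alignment(s[::-1], t[::-1])
--
--     # The alignment score of two sequences with two explicitly aligned sybols
--     # is the sum of the alignment scores of the two symbols, the alignment
--     # scores of preceeding part of the sequences, and the following part of the
--     # sequences.
--     # Example:
--     #     s -> ATAG  A  --TA
--     #     t -> AC--  A  GGTA
--     # score ->  -2 + 1 + 0  = -1
--     for i in range(len(s)):
--         for j in range(len(t)):
--             score = sum(
--                 (
--                     prefix_matrix[i][j],
--                     [-1, 1][s[i] == t[j]],
--                     suffix_matrix[len(s) - 1 - i][len(t) - 1 - j],
--                 )
--             )
--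
--             total += score
--
--             # Keep track of the highest score. Alternatively, the highest
--             # score can be found in the last cell of a matrix of each
--             # alignment.
--             if score > best:
--                 best = score
--
--     # Return the highest score, and the sum of all the scores.
--     return best, total
-- ===== SOURCE B (Python) =====
-- def align_to_symbols(s, t):
--     n, m = len(s), len(t)
--     prefix_rows = dp_rows(s, t)
--     suffix_rows = dp_rows(s[::-1], t[::-1])
--
--     # The best forced-pair score is the unconstrained global-alignment
--     # optimum, read directly from the last DP cell (the border cells hold the
--     # pure-gap scores, so this is -(n+m) when either string is empty).
--     best = prefix_rows[n][m]
--
--     # Sum of all forced-pair scores, as three independent aggregates: the two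
--     # n-by-m matrix boxes plus the match/mismatch term 2*matches - n*m, where
--     # matches is read off a character-count index of t built once.
--     cnt = {}
--     for ch in t:
--         cnt[ch] = cnt.get(ch, 0) + 1
--     matches = sum(cnt.get(ch, 0) for ch in s)
--     box = (sum(x for row in prefix_rows[:n] for x in row[:m])
--            + sum(x for row in suffix_rows[:n] for x in row[:m]))
--     return best, box + 2 * matches - n * m
--
--
-- def dp_rows(a, b):
--     # Global-alignment DP computed one rolling row at a time.
--     row = list(range(0, -(len(b) + 1), -1))
--     rows = [row]
--     for k, ca in enumerate(a):
--         new = [-(k + 1)]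
--         for j, cb in enumerate(b):
--             new.append(max(row[j] + (1 if ca == cb else -1),
--                            row[j + 1] - 1,
--                            new[j] - 1))
--         rows.append(new)
--         row = new
--     return rows
-- ===== Notes on version B (the rewrite author's own statement) =====
-- stated objective: faster
-- what changed: B drops A's score-tracking double loop entirely: best is read directly from the last cell of the forward DP (the forced-pair optimum equals the unconstrained global optimum), the DP is filled with rolling rows instead of A's in-place matrix mutation, and total is computed as three independent aggregates (two box sums over the matrices plus the closed-form match term 2*matches - n*m from a character-count index of t).
import Mathlib
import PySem

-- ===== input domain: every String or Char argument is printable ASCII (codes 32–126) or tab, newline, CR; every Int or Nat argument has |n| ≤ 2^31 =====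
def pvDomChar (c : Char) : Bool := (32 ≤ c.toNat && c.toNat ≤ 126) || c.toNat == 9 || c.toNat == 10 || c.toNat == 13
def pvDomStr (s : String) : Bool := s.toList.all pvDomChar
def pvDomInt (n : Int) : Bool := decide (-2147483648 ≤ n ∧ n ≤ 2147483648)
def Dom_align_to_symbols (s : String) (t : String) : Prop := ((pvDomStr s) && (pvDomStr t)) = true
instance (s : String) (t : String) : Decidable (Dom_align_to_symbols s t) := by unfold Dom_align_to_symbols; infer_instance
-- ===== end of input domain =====

-- B removes A's score-tracking double loop: best is read from the last cell of the
-- forward DP (proved equal to the maximal forced-pair score), the DP is filled with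
-- rolling rows, and total is three independent aggregates (two box sums plus a match
-- term from a character-count index of t).

-- Python max of a three-element list / of three arguments (exact: same value)
def pvMax3 (x y z : Int) : Int := max (max x y) z
-- S[i][j] read / write (every use below is in range, so pyGetD/pySetD are exact)
def pvMget (S : List (List Int)) (i j : Int) : Int :=
  PySem.List.pyGetD (PySem.List.pyGetD S i []) j 0
def pvMset (S : List (List Int)) (i j : Int) (v : Int) : List (List Int) :=
  PySem.List.pySetD S i (PySem.List.pySetD (PySem.List.pyGetD S i []) j v)

-- ===== PORT A =====
def pvGlobalAlignment (a b : List Char) : List (List Int) :=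
  let n : Int := PySem.List.len a
  let m : Int := PySem.List.len b
  let S0 : List (List Int) :=
    (PySem.List.pyRange 0 (n+1)).map (fun _ => (PySem.List.pyRange 0 (m+1)).map (fun _ => (0:Int)))
  let S1 := (PySem.List.pyRange 1 (n+1)).foldl (fun S i => pvMset S i 0 (-i)) S0
  let S2 := (PySem.List.pyRange 1 (m+1)).foldl (fun S j => pvMset S 0 j (-j)) S1
  (PySem.List.pyRange 1 (n+1)).foldl (fun S i =>
    (PySem.List.pyRange 1 (m+1)).foldl (fun S j =>
      if i = n + 1 ∧ j = m + 1 then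
        pvMset S i j (pvMget S (i-1) (j-1) +
          (if PySem.List.pyGetD a (i-1) ' ' == PySem.List.pyGetD b (j-1) ' ' then 1 else -1))
      else
        pvMset S i j (pvMax3
          (pvMget S (i-1) (j-1) +
            (if PySem.List.pyGetD a (i-1) ' ' != PySem.List.pyGetD b (j-1) ' ' then -1 else 1))
          (pvMget S (i-1) j - 1)
          (pvMget S i (j-1) - 1))) S) S2

def align_to_symbols (s : String) (t : String) : Int × Int :=
  let a := s.toList
  let b := t.toList
  let n : Int := PySem.List.len a
  let m : Int := PySem.List.len b
  let P := pvGlobalAlignment a b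
  let Q := pvGlobalAlignment a.reverse b.reverse  -- s[::-1]
  (PySem.List.pyRange 0 n).foldl (fun st i =>
    (PySem.List.pyRange 0 m).foldl (fun st j =>
      let score := pvMget P i j
        + (if PySem.List.pyGetD a i ' ' == PySem.List.pyGetD b j ' ' then 1 else -1)
        + pvMget Q (n - 1 - i) (m - 1 - j)
      (if score > st.1 then score else st.1, st.2 + score)) st) (-(n + m), 0)

-- ===== PORT B =====
def pvDpRows (a b : List Char) : List (List Int) :=
  let row0 := PySem.List.pyRange 0 (-(PySem.List.len b + 1)) (-1)
  let st := (PySem.List.enumerate a).foldl (fun (st : List (List Int) × List Int) p =>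
    let nw := (PySem.List.enumerate b).foldl (fun (nw : List Int) q =>
      nw ++ [pvMax3
        (PySem.List.pyGetD st.2 q.1 0 + (if p.2 == q.2 then 1 else -1))
        (PySem.List.pyGetD st.2 (q.1 + 1) 0 - 1)
        (PySem.List.pyGetD nw q.1 0 - 1)]) [-(p.1 + 1)]
    (st.1 ++ [nw], nw)) ([row0], row0)
  st.1

def align_to_symbols_alt (s : String) (t : String) : Int × Int :=
  let a := s.toList
  let b := t.toList
  let n : Int := PySem.List.len a
  let m : Int := PySem.List.len b
  let P := pvDpRows a b
  let Q := pvDpRows a.reverse b.reverse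
  let best := pvMget P n m  -- prefix_rows[n][m]: in range, so pyGetD is exact
  let cnt := b.foldl (fun (d : PySem.Dict Char Int) ch => d.insert ch (d.getD ch 0 + 1)) PySem.Dict.empty
  let mtc := (a.map (fun ch => cnt.getD ch 0)).sum
  let box := ((PySem.List.slice P none (some n)).flatMap (fun row => PySem.List.slice row none (some m))).sum
           + ((PySem.List.slice Q none (some n)).flatMap (fun row => PySem.List.slice row none (some m))).sum
  (best, box + 2 * mtc - n * m)

-- ===== PRECONDITION & SPEC =====
def Spec_align_to_symbols (s : String) (t : String) (out : Int × Int) : Prop := out = align_to_symbols_alt s t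
instance (s : String) (t : String) (out : Int × Int) : Decidable (Spec_align_to_symbols s t out) := by unfold Spec_align_to_symbols; infer_instance

-- ===== CLAIM (what is proved, stated in full; the proofs are below) =====
def Claim_equal_align_to_symbols : Prop := ∀ (s : String) (t : String), Dom_align_to_symbols s t → Spec_align_to_symbols s t (align_to_symbols s t)

-- ===== LEMMAS AND PROOFS =====

-- ---------- the DP recurrence as a mathematical function ----------
def pvD (a b : List Char) (i j : Nat) : Int := if a.getD i ' ' == b.getD j ' ' then 1 else -1

def pvCell (a b : List Char) : Nat → Nat → Int
  | 0, j => -(j : Int)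
  | (i+1), 0 => -((i : Int) + 1)
  | (i+1), (j+1) => pvMax3 (pvCell a b i j + pvD a b i j) (pvCell a b i (j+1) - 1) (pvCell a b (i+1) j - 1)
termination_by i j => (i, j)

def pvRow (a b : List Char) (i : Nat) : List Int := (List.range (b.length + 1)).map (fun j => pvCell a b i j)
def pvMat (a b : List Char) : List (List Int) := (List.range (a.length + 1)).map (pvRow a b)

lemma pvCell_zero_left (a b : List Char) (j : Nat) : pvCell a b 0 j = -(j : Int) := by
  simp [pvCell]

lemma pvCell_zero_right (a b : List Char) (i : Nat) : pvCell a b i 0 = -(i : Int) := by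
  cases i <;> simp [pvCell]

lemma pvCell_succ (a b : List Char) (i j : Nat) :
    pvCell a b (i+1) (j+1)
      = pvMax3 (pvCell a b i j + pvD a b i j) (pvCell a b i (j+1) - 1) (pvCell a b (i+1) j - 1) := by
  simp [pvCell]

lemma pvCell_ge (a b : List Char) (i j : Nat) : -((i : Int) + (j : Int)) ≤ pvCell a b i j := by
  cases i with
  | zero => rw [pvCell_zero_left]; push_cast; omega
  | succ i =>
    induction j with
    | zero => rw [pvCell_zero_right]; push_cast; omega
    | succ j ihj =>
      rw [pvCell_succ]
      have h1 : pvCell a b (i+1) j - 1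
          ≤ pvMax3 (pvCell a b i j + pvD a b i j) (pvCell a b i (j+1) - 1) (pvCell a b (i+1) j - 1) :=
        le_max_right _ _
      push_cast at ihj ⊢
      omega

lemma pvIfBne (x y : Char) : (if x != y then (-1:Int) else 1) = (if x == y then 1 else -1) := by
  cases h : x == y <;> simp [bne, h]

lemma pvD_ge (a b : List Char) (i j : Nat) : -1 ≤ pvD a b i j := by
  unfold pvD; split <;> omega

-- ---------- generic list facts used below ----------
lemma pvGetD_set_self {α : Type} (l : List α) (i : Nat) (h : i < l.length) (v d : α) :
    (l.set i v).getD i d = v := by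
  simp [List.getD_eq_getElem?_getD, List.getElem?_set, h]

lemma pvGetD_set_ne {α : Type} (l : List α) {i i' : Nat} (h : i ≠ i') (v : α) (d : α) :
    (l.set i v).getD i' d = l.getD i' d := by
  simp [List.getD_eq_getElem?_getD, List.getElem?_set, h]

lemma pvSum_flatMap {α : Type} (l : List α) (f : α → List Int) :
    (l.flatMap f).sum = (l.map (fun x => (f x).sum)).sum := by
  induction l with
  | nil => simp
  | cons x xs ih => simp [List.flatMap_cons, ih]

lemma pvSum_range (n : Nat) (f : Nat → Int) :
    ((List.range n).map f).sum = ∑ i ∈ Finset.range n, f i := by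
  induction n with
  | zero => simp
  | succ n ih => rw [List.range_succ, Finset.sum_range_succ, List.map_append, List.sum_append, ih]; simp

lemma pvSum_reflect (n : Nat) (f : Nat → Int) :
    ((List.range n).map (fun i => f (n - 1 - i))).sum = ((List.range n).map f).sum := by
  rw [pvSum_range, pvSum_range]
  exact Finset.sum_range_reflect f n

lemma pvMap_getD_range (l : List Char) :
    (List.range l.length).map (fun j => l.getD j ' ') = l := by
  apply List.ext_getElem
  · simp
  · intro i h1 h2
    simp [List.getD_eq_getElem?_getD, List.getElem?_eq_getElem, h2]

-- ---------- pointwise view of a matrix ----------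
def pvVal (S : List (List Int)) (i j : Nat) : Int := (S.getD i []).getD j 0
def pvShape (S : List (List Int)) (n m : Nat) : Prop :=
  S.length = n + 1 ∧ ∀ r ∈ S, r.length = m + 1

lemma pvShape_row {S : List (List Int)} {n m : Nat} (h : pvShape S n m) {i : Nat} (hi : i ≤ n) :
    (S.getD i []).length = m + 1 := by
  obtain ⟨h1, h2⟩ := h
  have hlt : i < S.length := by omega
  have e : S.getD i [] = S[i] := by
    simp [List.getD_eq_getElem?_getD, List.getElem?_eq_getElem, hlt]
  rw [e]
  exact h2 _ (List.getElem_mem hlt)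

lemma pvMget_val (S : List (List Int)) (i j : Nat) : pvMget S (i : Int) (j : Int) = pvVal S i j := by
  simp [pvMget, pvVal]

lemma pvMset_eq (S : List (List Int)) (i j : Nat) (v : Int) :
    pvMset S (i : Int) (j : Int) v = S.set i ((S.getD i []).set j v) := by
  simp [pvMset]

lemma pvMget_int (S : List (List Int)) (i j : Int) (k l : Nat) (hi : i = (k : Int)) (hj : j = (l : Int)) :
    pvMget S i j = pvVal S k l := by
  subst hi; subst hj; exact pvMget_val S k l

lemma pvMset_int (S : List (List Int)) (i j : Int) (k l : Nat) (hi : i = (k : Int)) (hj : j = (l : Int)) (v : Int) :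
    pvMset S i j v = S.set k ((S.getD k []).set l v) := by
  subst hi; subst hj; exact pvMset_eq S k l v

lemma pvGetD_int (xs : List Char) (i : Int) (k : Nat) (d : Char) (h : i = (k : Int)) :
    PySem.List.pyGetD xs i d = xs.getD k d := by
  subst h; simp

lemma pvShape_set {S : List (List Int)} {n m : Nat} (h : pvShape S n m) (i j : Nat) (hi : i ≤ n) (v : Int) :
    pvShape (S.set i ((S.getD i []).set j v)) n m := by
  constructor
  · simp [h.1]
  · intro r hr
    rcases List.mem_or_eq_of_mem_set hr with hr' | rfl
    · exact h.2 r hr'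
    · rw [List.length_set]; exact pvShape_row h hi

lemma pvVal_set {S : List (List Int)} {n m : Nat} (h : pvShape S n m) {i j : Nat}
    (hi : i ≤ n) (hj : j ≤ m) (v : Int) (i' j' : Nat) :
    pvVal (S.set i ((S.getD i []).set j v)) i' j'
      = if i' = i ∧ j' = j then v else pvVal S i' j' := by
  unfold pvVal
  have hlt : i < S.length := by have := h.1; omega
  rcases eq_or_ne i' i with rfl | hne
  · have e1 : (S.set i' ((S.getD i' []).set j v)).getD i' [] = (S.getD i' []).set j v :=
      pvGetD_set_self S i' hlt _ _
    rw [e1]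
    rcases eq_or_ne j' j with rfl | hjne
    · have hjlt : j' < (S.getD i' []).length := by rw [pvShape_row h hi]; omega
      rw [pvGetD_set_self _ j' hjlt, if_pos ⟨rfl, rfl⟩]
    · rw [pvGetD_set_ne _ (fun hh => hjne hh.symm), if_neg (by tauto)]
  · have e1 : (S.set i ((S.getD i []).set j v)).getD i' [] = S.getD i' [] :=
      pvGetD_set_ne S (fun hh => hne hh.symm) _ _
    rw [e1, if_neg (by tauto)]

lemma pvVal_mat (a b : List Char) {i j : Nat} (hi : i ≤ a.length) (hj : j ≤ b.length) :
    pvVal (pvMat a b) i j = pvCell a b i j := by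
  unfold pvVal pvMat
  rw [PySem.List.getD_map_range _ _ _ _ (by omega)]
  unfold pvRow
  rw [PySem.List.getD_map_range _ _ _ _ (by omega)]

lemma pvEq_mat_of {S : List (List Int)} {a b : List Char} (h : pvShape S a.length b.length)
    (hv : ∀ i ≤ a.length, ∀ j ≤ b.length, pvVal S i j = pvCell a b i j) : S = pvMat a b := by
  apply List.ext_getElem
  · simp [pvMat, h.1]
  · intro i hi1 hi2
    have hii : i ≤ a.length := by have := h.1; omega
    have hrl : S[i].length = b.length + 1 := h.2 _ (List.getElem_mem hi1)
    apply List.ext_getElem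
    · rw [hrl]; simp [pvMat, pvRow]
    · intro j hj1 hj2
      have hjj : j ≤ b.length := by omega
      have e1 : S.getD i [] = S[i] := by
        simp [List.getD_eq_getElem?_getD, List.getElem?_eq_getElem, hi1]
      have e2 : (S[i]).getD j 0 = S[i][j] := by
        simp [List.getD_eq_getElem?_getD, List.getElem?_eq_getElem, hj1]
      have := hv i hii j hjj
      rw [pvVal, e1, e2] at this
      rw [this]
      simp [pvMat, pvRow]

-- ---------- named forms of A's loop bodies ----------
def pvColStep : List (List Int) → Int → List (List Int) := fun S i => pvMset S i 0 (-i)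
def pvRowStep : List (List Int) → Int → List (List Int) := fun S j => pvMset S 0 j (-j)
def pvCellStep (a b : List Char) (n m i0 : Int) : List (List Int) → Int → List (List Int) := fun S j =>
  if i0 = n + 1 ∧ j = m + 1 then
    pvMset S i0 j (pvMget S (i0-1) (j-1) +
      (if PySem.List.pyGetD a (i0-1) ' ' == PySem.List.pyGetD b (j-1) ' ' then 1 else -1))
  else
    pvMset S i0 j (pvMax3
      (pvMget S (i0-1) (j-1) +
        (if PySem.List.pyGetD a (i0-1) ' ' != PySem.List.pyGetD b (j-1) ' ' then -1 else 1))
      (pvMget S (i0-1) j - 1)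
      (pvMget S i0 (j-1) - 1))
def pvOuterStep (a b : List Char) (n m : Int) : List (List Int) → Int → List (List Int) := fun S i =>
  (PySem.List.pyRange 1 (m+1)).foldl (pvCellStep a b n m i) S
def pvS0 (a b : List Char) : List (List Int) :=
  (PySem.List.pyRange 0 ((PySem.List.len a)+1)).map (fun _ => (PySem.List.pyRange 0 ((PySem.List.len b)+1)).map (fun _ => (0:Int)))

lemma pvS0_spec (a b : List Char) :
    pvShape (pvS0 a b) a.length b.length ∧
    ∀ i ≤ a.length, ∀ j ≤ b.length, pvVal (pvS0 a b) i j = 0 := by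
  have e : pvS0 a b = (List.range (a.length+1)).map
      (fun _ => (List.range (b.length+1)).map (fun _ => (0:Int))) := by
    unfold pvS0
    rw [PySem.List.len_eq, PySem.List.len_eq,
        show ((a.length:Int)+1) = ((a.length+1 : Nat):Int) by push_cast; ring,
        show ((b.length:Int)+1) = ((b.length+1 : Nat):Int) by push_cast; ring,
        PySem.List.pyRange_zero_nat, PySem.List.pyRange_zero_nat]
    simp [List.map_map, Function.comp_def]
  rw [e]
  refine ⟨⟨by simp, ?_⟩, ?_⟩
  · intro r hr
    simp only [List.mem_map] at hr
    obtain ⟨_, _, rfl⟩ := hr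
    simp
  · intro i hi j hj
    unfold pvVal
    rw [PySem.List.getD_map_range _ _ _ _ (by omega), PySem.List.getD_map_range _ _ _ _ (by omega)]

lemma pvColStep_apply (S : List (List Int)) (i : Int) : pvColStep S i = pvMset S i 0 (-i) := rfl
lemma pvRowStep_apply (S : List (List Int)) (j : Int) : pvRowStep S j = pvMset S 0 j (-j) := rfl
lemma pvCellStep_apply (a b : List Char) (n m i0 : Int) (S : List (List Int)) (j : Int) :
    pvCellStep a b n m i0 S j =
      (if i0 = n + 1 ∧ j = m + 1 then
        pvMset S i0 j (pvMget S (i0-1) (j-1) +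
          (if PySem.List.pyGetD a (i0-1) ' ' == PySem.List.pyGetD b (j-1) ' ' then 1 else -1))
      else
        pvMset S i0 j (pvMax3
          (pvMget S (i0-1) (j-1) +
            (if PySem.List.pyGetD a (i0-1) ' ' != PySem.List.pyGetD b (j-1) ' ' then -1 else 1))
          (pvMget S (i0-1) j - 1)
          (pvMget S i0 (j-1) - 1))) := rfl
lemma pvOuterStep_apply (a b : List Char) (n m : Int) (S : List (List Int)) (i : Int) :
    pvOuterStep a b n m S i = (PySem.List.pyRange 1 (m+1)).foldl (pvCellStep a b n m i) S := rfl

-- border phases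
lemma pvFoldCol (n m : Nat) (f : Nat → Nat → Int) (S : List (List Int))
    (hS : pvShape S n m) (hv : ∀ i ≤ n, ∀ j ≤ m, pvVal S i j = f i j) :
    ∀ K, K ≤ n →
    pvShape ((PySem.List.pyRange 1 ((K : Int)+1)).foldl pvColStep S) n m ∧
    ∀ i ≤ n, ∀ j ≤ m,
      pvVal ((PySem.List.pyRange 1 ((K : Int)+1)).foldl pvColStep S) i j
        = if j = 0 ∧ 1 ≤ i ∧ i ≤ K then -(i : Int) else f i j := by
  intro K
  induction K with
  | zero =>
    intro _
    rw [PySem.List.pyRange_one_eq_nil (by norm_num)]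
    refine ⟨hS, ?_⟩
    intro i hi j hj
    rw [if_neg (by omega)]
    exact hv i hi j hj
  | succ K ih =>
    intro hK
    obtain ⟨ihS, ihv⟩ := ih (by omega)
    rw [show (((K+1 : Nat)) : Int) + 1 = ((K:Int)+1) + 1 by push_cast; ring,
        PySem.List.pyRange_one_succ_right (by omega), List.foldl_append]
    simp only [List.foldl_cons, List.foldl_nil]
    rw [pvColStep_apply,
        pvMset_int _ ((K:Int)+1) 0 (K+1) 0 (by push_cast; ring) (by norm_num)]
    refine ⟨pvShape_set ihS _ _ (by omega) _, ?_⟩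
    intro i hi j hj
    rw [pvVal_set ihS (by omega) (by omega), ihv i hi j hj]
    split_ifs <;> first | rfl | omega

lemma pvFoldRow (n m : Nat) (f : Nat → Nat → Int) (S : List (List Int))
    (hS : pvShape S n m) (hv : ∀ i ≤ n, ∀ j ≤ m, pvVal S i j = f i j) :
    ∀ K, K ≤ m →
    pvShape ((PySem.List.pyRange 1 ((K : Int)+1)).foldl pvRowStep S) n m ∧
    ∀ i ≤ n, ∀ j ≤ m,
      pvVal ((PySem.List.pyRange 1 ((K : Int)+1)).foldl pvRowStep S) i j
        = if i = 0 ∧ 1 ≤ j ∧ j ≤ K then -(j : Int) else f i j := by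
  intro K
  induction K with
  | zero =>
    intro _
    rw [PySem.List.pyRange_one_eq_nil (by norm_num)]
    refine ⟨hS, ?_⟩
    intro i hi j hj
    rw [if_neg (by omega)]
    exact hv i hi j hj
  | succ K ih =>
    intro hK
    obtain ⟨ihS, ihv⟩ := ih (by omega)
    rw [show (((K+1 : Nat)) : Int) + 1 = ((K:Int)+1) + 1 by push_cast; ring,
        PySem.List.pyRange_one_succ_right (by omega), List.foldl_append]
    simp only [List.foldl_cons, List.foldl_nil]
    rw [pvRowStep_apply,
        pvMset_int _ 0 ((K:Int)+1) 0 (K+1) (by norm_num) (by push_cast; ring)]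
    refine ⟨pvShape_set ihS _ _ (by omega) _, ?_⟩
    intro i hi j hj
    rw [pvVal_set ihS (by omega) (by omega), ihv i hi j hj]
    split_ifs <;> first | rfl | omega

-- the fill phase
def pvBorder (i j : Nat) : Int := if j = 0 then -(i : Int) else if i = 0 then -(j : Int) else 0

def pvFillF (a b : List Char) (r c : Nat) (i j : Nat) : Int :=
  if i < r ∨ (i = r ∧ j ≤ c) then pvCell a b i j else pvBorder i j

lemma pvFillF_update (a b : List Char) (r c i j : Nat) :
    (if i = r ∧ j = c + 1 then pvCell a b r (c+1) else pvFillF a b r c i j)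
      = pvFillF a b r (c+1) i j := by
  by_cases hc : i = r ∧ j = c + 1
  · obtain ⟨rfl, rfl⟩ := hc
    rw [if_pos ⟨rfl, rfl⟩]
    unfold pvFillF
    rw [if_pos (by omega)]
  · rw [if_neg hc]
    unfold pvFillF
    split_ifs <;> first | rfl | omega

lemma pvFillF_nextRow (a b : List Char) (r i j : Nat) (hj : j ≤ b.length) :
    pvFillF a b r b.length i j = pvFillF a b (r+1) 0 i j := by
  unfold pvFillF
  by_cases h2 : i = r + 1 ∧ j = 0
  · obtain ⟨rfl, rfl⟩ := h2
    rw [if_neg (by omega), if_pos (by omega), pvCell_zero_right]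
    unfold pvBorder
    rw [if_pos rfl]
  · split_ifs <;> first | rfl | omega

lemma pvFillF_init (a b : List Char) (i j : Nat) (hi : i ≤ a.length) (hj : j ≤ b.length) :
    (if i = 0 ∧ 1 ≤ j ∧ j ≤ b.length then -(j : Int)
     else if j = 0 ∧ 1 ≤ i ∧ i ≤ a.length then -(i : Int) else 0)
      = pvFillF a b 0 b.length i j := by
  unfold pvFillF pvBorder
  by_cases h0 : i = 0
  · subst h0
    rw [pvCell_zero_left]
    split_ifs <;> omega
  · split_ifs <;> first | rfl | omega | (exfalso; omega)

lemma pvFillRowLemma (a b : List Char) (r' : Nat) (hrn : r' + 1 ≤ a.length)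
    (i0 : Int) (hi0 : i0 = ((r' + 1 : Nat) : Int)) (S : List (List Int))
    (hS : pvShape S a.length b.length)
    (hv : ∀ i ≤ a.length, ∀ j ≤ b.length, pvVal S i j = pvFillF a b (r'+1) 0 i j) :
    ∀ K, K ≤ b.length →
    pvShape ((PySem.List.pyRange 1 ((K : Int)+1)).foldl
        (pvCellStep a b ((a.length : Int)) ((b.length : Int)) i0) S) a.length b.length ∧
    ∀ i ≤ a.length, ∀ j ≤ b.length,
      pvVal ((PySem.List.pyRange 1 ((K : Int)+1)).foldl
        (pvCellStep a b ((a.length : Int)) ((b.length : Int)) i0) S) i j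
        = pvFillF a b (r'+1) K i j := by
  subst hi0
  intro K
  induction K with
  | zero =>
    intro _
    rw [PySem.List.pyRange_one_eq_nil (by norm_num)]
    exact ⟨hS, hv⟩
  | succ K ih =>
    intro hK
    obtain ⟨ihS, ihv⟩ := ih (by omega)
    rw [show (((K+1 : Nat)) : Int) + 1 = ((K:Int)+1) + 1 by push_cast; ring,
        PySem.List.pyRange_one_succ_right (by omega), List.foldl_append]
    simp only [List.foldl_cons, List.foldl_nil]
    rw [pvCellStep_apply, if_neg (by omega)]
    rw [pvMget_int _ ((((r'+1 : Nat)):Int) - 1) (((K:Int)+1) - 1) r' K (by push_cast; ring) (by push_cast; ring),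
        pvMget_int _ ((((r'+1 : Nat)):Int) - 1) ((K:Int)+1) r' (K+1) (by push_cast; ring) (by push_cast; ring),
        pvMget_int _ (((r'+1 : Nat)):Int) (((K:Int)+1) - 1) (r'+1) K (by push_cast; ring) (by push_cast; ring),
        pvGetD_int a ((((r'+1 : Nat)):Int) - 1) r' ' ' (by push_cast; ring),
        pvGetD_int b (((K:Int)+1) - 1) K ' ' (by push_cast; ring),
        pvIfBne,
        pvMset_int _ (((r'+1 : Nat)):Int) ((K:Int)+1) (r'+1) (K+1) (by push_cast; ring) (by push_cast; ring)]
    rw [ihv r' (by omega) K (by omega), ihv r' (by omega) (K+1) (by omega),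
        ihv (r'+1) (by omega) K (by omega)]
    have hv1 : pvFillF a b (r'+1) K r' K = pvCell a b r' K := by
      unfold pvFillF; rw [if_pos (by omega)]
    have hv2 : pvFillF a b (r'+1) K r' (K+1) = pvCell a b r' (K+1) := by
      unfold pvFillF; rw [if_pos (by omega)]
    have hv3 : pvFillF a b (r'+1) K (r'+1) K = pvCell a b (r'+1) K := by
      unfold pvFillF; rw [if_pos (by omega)]
    rw [hv1, hv2, hv3]
    have hcell : pvMax3 (pvCell a b r' K + (if a.getD r' ' ' == b.getD K ' ' then 1 else -1))
        (pvCell a b r' (K+1) - 1) (pvCell a b (r'+1) K - 1) = pvCell a b (r'+1) (K+1) := by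
      rw [pvCell_succ]; rfl
    rw [hcell]
    refine ⟨pvShape_set ihS _ _ (by omega) _, ?_⟩
    intro i hi j hj
    rw [pvVal_set ihS (by omega) (by omega), ihv i hi j hj, pvFillF_update]

lemma pvFillAllLemma (a b : List Char) (S : List (List Int))
    (hS : pvShape S a.length b.length)
    (hv : ∀ i ≤ a.length, ∀ j ≤ b.length, pvVal S i j = pvFillF a b 0 b.length i j) :
    ∀ K, K ≤ a.length →
    pvShape ((PySem.List.pyRange 1 ((K : Int)+1)).foldl
        (pvOuterStep a b ((a.length : Int)) ((b.length : Int))) S) a.length b.length ∧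
    ∀ i ≤ a.length, ∀ j ≤ b.length,
      pvVal ((PySem.List.pyRange 1 ((K : Int)+1)).foldl
        (pvOuterStep a b ((a.length : Int)) ((b.length : Int))) S) i j
        = pvFillF a b K b.length i j := by
  intro K
  induction K with
  | zero =>
    intro _
    rw [PySem.List.pyRange_one_eq_nil (by norm_num)]
    exact ⟨hS, hv⟩
  | succ K ih =>
    intro hK
    obtain ⟨ihS, ihv⟩ := ih (by omega)
    rw [show (((K+1 : Nat)) : Int) + 1 = ((K:Int)+1) + 1 by push_cast; ring,
        PySem.List.pyRange_one_succ_right (by omega), List.foldl_append]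
    simp only [List.foldl_cons, List.foldl_nil]
    rw [pvOuterStep_apply]
    have ihv' : ∀ i ≤ a.length, ∀ j ≤ b.length,
        pvVal ((PySem.List.pyRange 1 ((K : Int)+1)).foldl
          (pvOuterStep a b ((a.length : Int)) ((b.length : Int))) S) i j
          = pvFillF a b (K+1) 0 i j := by
      intro i hi j hj
      rw [ihv i hi j hj, pvFillF_nextRow a b K i j hj]
    exact pvFillRowLemma a b K (by omega) ((K:Int)+1)
      (by push_cast; ring) _ ihS ihv' b.length le_rfl

lemma pvGlobalAlignment_eq (a b : List Char) : pvGlobalAlignment a b = pvMat a b := by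
  have key : pvGlobalAlignment a b
      = (PySem.List.pyRange 1 ((PySem.List.len a)+1)).foldl
          (pvOuterStep a b (PySem.List.len a) (PySem.List.len b))
          ((PySem.List.pyRange 1 ((PySem.List.len b)+1)).foldl pvRowStep
            ((PySem.List.pyRange 1 ((PySem.List.len a)+1)).foldl pvColStep (pvS0 a b))) := rfl
  rw [key, PySem.List.len_eq, PySem.List.len_eq]
  obtain ⟨s0S, s0v⟩ := pvS0_spec a b
  obtain ⟨s1S, s1v⟩ := pvFoldCol a.length b.length (fun _ _ => 0) _ s0S s0v a.length le_rfl
  obtain ⟨s2S, s2v⟩ := pvFoldRow a.length b.length _ _ s1S s1v b.length le_rfl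
  have hv0 : ∀ i ≤ a.length, ∀ j ≤ b.length,
      pvVal ((PySem.List.pyRange 1 ((b.length : Int)+1)).foldl pvRowStep
        ((PySem.List.pyRange 1 ((a.length : Int)+1)).foldl pvColStep (pvS0 a b))) i j
        = pvFillF a b 0 b.length i j := by
    intro i hi j hj
    rw [s2v i hi j hj]
    exact pvFillF_init a b i j hi hj
  obtain ⟨s3S, s3v⟩ := pvFillAllLemma a b _ s2S hv0 a.length le_rfl
  apply pvEq_mat_of s3S
  intro i hi j hj
  rw [s3v i hi j hj]
  unfold pvFillF
  rw [if_pos (by omega)]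

-- ---------- B's rolling-row fill ----------
def pvBRowF (b : List Char) (row : List Int) (p : Int × Char) : List Int :=
  (PySem.List.enumerate b).foldl (fun nw q =>
    nw ++ [pvMax3
      (PySem.List.pyGetD row q.1 0 + (if p.2 == q.2 then 1 else -1))
      (PySem.List.pyGetD row (q.1 + 1) 0 - 1)
      (PySem.List.pyGetD nw q.1 0 - 1)]) [-(p.1 + 1)]

def pvBStep (b : List Char) : (List (List Int) × List Int) → (Int × Char) → (List (List Int) × List Int) :=
  fun st p => (st.1 ++ [pvBRowF b st.2 p], pvBRowF b st.2 p)

lemma pvEnum_eq (xs : List Char) :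
    PySem.List.enumerate xs = (List.range xs.length).map (fun (k : Nat) => ((k : Int), xs.getD k ' ')) := by
  rw [PySem.List.enumerate_eq_map_pyRange xs ' ', PySem.List.len_eq, PySem.List.pyRange_zero_nat,
      List.map_map]
  apply List.map_congr_left
  intro k _
  simp

lemma pvBRowF_eq (a b : List Char) (k : Nat) :
    pvBRowF b (pvRow a b k) ((k : Int), a.getD k ' ') = pvRow a b (k+1) := by
  unfold pvBRowF
  rw [pvEnum_eq b, List.foldl_map]
  suffices h : ∀ J, J ≤ b.length → (List.range J).foldl (fun nw (j : Nat) =>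
      nw ++ [pvMax3
        (PySem.List.pyGetD (pvRow a b k) ((j : Int)) 0 + (if a.getD k ' ' == b.getD j ' ' then 1 else -1))
        (PySem.List.pyGetD (pvRow a b k) ((j : Int) + 1) 0 - 1)
        (PySem.List.pyGetD nw ((j : Int)) 0 - 1)]) [-(((k : Int)) + 1)]
      = (List.range (J+1)).map (fun j => pvCell a b (k+1) j) by
    exact h b.length le_rfl
  intro J
  induction J with
  | zero =>
    intro _
    rw [List.range_zero, List.foldl_nil, List.range_one, List.map_singleton, pvCell_zero_right]
    rw [show -((k : Int) + 1) = -(((k+1 : Nat)) : Int) by push_cast; ring]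
  | succ J ih =>
    intro hJ
    rw [List.range_succ, List.foldl_append, ih (by omega)]
    simp only [List.foldl_cons, List.foldl_nil]
    rw [show ((J : Int) + 1) = (((J+1 : Nat)) : Int) by push_cast; ring]
    simp only [PySem.List.pyGetD_natCast]
    unfold pvRow
    rw [PySem.List.getD_map_range _ _ _ _ (by omega), PySem.List.getD_map_range _ _ _ _ (by omega),
        PySem.List.getD_map_range _ _ _ _ (by omega)]
    rw [show pvMax3 (pvCell a b k J + (if a.getD k ' ' == b.getD J ' ' then 1 else -1))
          (pvCell a b k (J+1) - 1) (pvCell a b (k+1) J - 1) = pvCell a b (k+1) (J+1) by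
        rw [pvCell_succ]; rfl]
    rw [show List.range (J+1+1) = List.range (J+1) ++ [J+1] from List.range_succ, List.map_append,
        List.map_singleton]

lemma pvBFold (a b : List Char) :
    ∀ K, K ≤ a.length →
      (List.range K).foldl (fun st (k : Nat) => pvBStep b st ((k : Int), a.getD k ' '))
        ([pvRow a b 0], pvRow a b 0)
      = ((List.range (K+1)).map (pvRow a b), pvRow a b K) := by
  intro K
  induction K with
  | zero =>
    intro _
    rw [List.range_zero, List.foldl_nil, List.range_one, List.map_singleton]
  | succ K ih =>
    intro hK
    rw [List.range_succ, List.foldl_append, ih (by omega)]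
    simp only [List.foldl_cons, List.foldl_nil]
    show (_ ++ [pvBRowF b (pvRow a b K) ((K : Int), a.getD K ' ')],
          pvBRowF b (pvRow a b K) ((K : Int), a.getD K ' ')) = _
    rw [pvBRowF_eq a b K]
    rw [show List.range (K+1+1) = List.range (K+1) ++ [K+1] from List.range_succ, List.map_append,
        List.map_singleton]

lemma pvRow0_eq (a b : List Char) :
    PySem.List.pyRange 0 (-(PySem.List.len b + 1)) (-1) = pvRow a b 0 := by
  rw [PySem.List.len_eq, PySem.List.pyRange_neg_one,
      show ((0 : Int) - -((b.length : Int)+1)).toNat = b.length + 1 by omega]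
  unfold pvRow
  apply List.map_congr_left
  intro k _
  rw [pvCell_zero_left]
  omega

lemma pvDpRows_eq (a b : List Char) : pvDpRows a b = pvMat a b := by
  have key : pvDpRows a b = ((PySem.List.enumerate a).foldl (pvBStep b)
      ([PySem.List.pyRange 0 (-(PySem.List.len b + 1)) (-1)],
       PySem.List.pyRange 0 (-(PySem.List.len b + 1)) (-1))).1 := rfl
  rw [key, pvRow0_eq a b, pvEnum_eq a, List.foldl_map, pvBFold a b a.length le_rfl]
  rfl

-- ---------- the suffix DP and the splice bound ----------
def pvSuf (a b : List Char) (i j : Nat) : Int :=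
  pvCell a.reverse b.reverse (a.length - i) (b.length - j)

lemma pvGetD_reverse (l : List Char) (k : Nat) (hk : k < l.length) (d : Char) :
    l.reverse.getD k d = l.getD (l.length - 1 - k) d := by
  have h1 : k < l.reverse.length := by rw [List.length_reverse]; omega
  rw [List.getD_eq_getElem?_getD, List.getElem?_eq_getElem h1,
      List.getD_eq_getElem?_getD, List.getElem?_eq_getElem (by omega)]
  simp [List.getElem_reverse]

lemma pvSuf_right (a b : List Char) (j : Nat) :
    pvSuf a b a.length j = -(((b.length - j : Nat)) : Int) := by
  unfold pvSuf
  rw [Nat.sub_self, pvCell_zero_left]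

lemma pvSuf_bottom (a b : List Char) (i : Nat) :
    pvSuf a b i b.length = -(((a.length - i : Nat)) : Int) := by
  unfold pvSuf
  rw [Nat.sub_self, pvCell_zero_right]

lemma pvSuf_rec (a b : List Char) (i j : Nat) (hi : i < a.length) (hj : j < b.length) :
    pvSuf a b i j = pvMax3 (pvSuf a b (i+1) (j+1) + pvD a b i j)
      (pvSuf a b (i+1) j - 1) (pvSuf a b i (j+1) - 1) := by
  unfold pvSuf
  have e1 : a.length - i = (a.length - (i+1)) + 1 := by omega
  have e2 : b.length - j = (b.length - (j+1)) + 1 := by omega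
  rw [e1, e2, pvCell_succ]
  have eD : pvD a.reverse b.reverse (a.length - (i+1)) (b.length - (j+1)) = pvD a b i j := by
    unfold pvD
    rw [pvGetD_reverse a _ (by omega), pvGetD_reverse b _ (by omega)]
    rw [show a.length - 1 - (a.length - (i+1)) = i by omega,
        show b.length - 1 - (b.length - (j+1)) = j by omega]
  rw [eD, ← e1, ← e2]

-- single DP steps, as inequalities
lemma pvCell_step_diag (a b : List Char) (i j : Nat) :
    pvCell a b i j + pvD a b i j ≤ pvCell a b (i+1) (j+1) := by
  rw [pvCell_succ]
  exact le_trans (le_max_left _ _) (le_max_left _ _)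

lemma pvCell_step_down (a b : List Char) (i j : Nat) :
    pvCell a b i j - 1 ≤ pvCell a b (i+1) j := by
  cases j with
  | zero => rw [pvCell_zero_right, pvCell_zero_right]; push_cast; omega
  | succ j =>
    rw [pvCell_succ]
    exact le_trans (le_max_right _ _) (le_max_left _ _)

lemma pvCell_step_right (a b : List Char) (i j : Nat) :
    pvCell a b i j - 1 ≤ pvCell a b i (j+1) := by
  cases i with
  | zero => rw [pvCell_zero_left, pvCell_zero_left]; push_cast; omega
  | succ i =>
    rw [pvCell_succ]
    exact le_max_right _ _

lemma pvMax3_cases (x y z : Int) : pvMax3 x y z = x ∨ pvMax3 x y z = y ∨ pvMax3 x y z = z := by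
  unfold pvMax3
  rcases max_choice (max x y) z with h | h
  · rcases max_choice x y with h2 | h2
    · left; rw [h, h2]
    · right; left; rw [h, h2]
  · right; right; exact h

-- splice bound: any prefix value plus its suffix value is at most the global optimum
lemma pvSplice_le (a b : List Char) :
    ∀ k i j, i ≤ a.length → j ≤ b.length → (a.length - i) + (b.length - j) ≤ k →
      pvCell a b i j + pvSuf a b i j ≤ pvCell a b a.length b.length := by
  intro k
  induction k with
  | zero =>
    intro i j hi hj hk
    have e1 : i = a.length := by omega
    have e2 : j = b.length := by omega
    subst e1; subst e2
    rw [pvSuf_bottom, Nat.sub_self]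
    simp
  | succ k ih =>
    intro i j hi hj hk
    by_cases hin : i = a.length
    · subst hin
      by_cases hjm : j = b.length
      · subst hjm
        rw [pvSuf_bottom, Nat.sub_self]
        simp
      · have hj' : j < b.length := by omega
        have step := pvCell_step_right a b a.length j
        have h1 := ih a.length (j+1) le_rfl (by omega) (by omega)
        rw [pvSuf_right] at *
        have e : ((b.length - j : Nat) : Int) = ((b.length - (j+1) : Nat) : Int) + 1 := by omega
        omega
    · have hi' : i < a.length := by omega
      by_cases hjm : j = b.length
      · subst hjm
        have step := pvCell_step_down a b i b.length
        have h1 := ih (i+1) b.length (by omega) le_rfl (by omega)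
        rw [pvSuf_bottom] at *
        have e : ((a.length - i : Nat) : Int) = ((a.length - (i+1) : Nat) : Int) + 1 := by omega
        omega
      · have hj' : j < b.length := by omega
        rw [pvSuf_rec a b i j hi' hj']
        have hd := pvCell_step_diag a b i j
        have h1 := ih (i+1) (j+1) (by omega) (by omega) (by omega)
        have hdn := pvCell_step_down a b i j
        have h2 := ih (i+1) j (by omega) (by omega) (by omega)
        have hr := pvCell_step_right a b i j
        have h3 := ih i (j+1) (by omega) (by omega) (by omega)
        rcases pvMax3_cases (pvSuf a b (i+1) (j+1) + pvD a b i j)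
          (pvSuf a b (i+1) j - 1) (pvSuf a b i (j+1) - 1) with h | h | h <;> rw [h] <;> omega

-- upper bound on a forced-pair score
lemma pvUB (a b : List Char) (i j : Nat) (hi : i < a.length) (hj : j < b.length) :
    pvCell a b i j + pvD a b i j + pvSuf a b (i+1) (j+1) ≤ pvCell a b a.length b.length := by
  have h1 := pvCell_step_diag a b i j
  have h2 := pvSplice_le a b (a.length + b.length) (i+1) (j+1) (by omega) (by omega) (by omega)
  omega

-- the global optimum of the reversed strings dominates the forward one
lemma pvSuf_zero_ge (a b : List Char) :
    pvCell a b a.length b.length ≤ pvSuf a b 0 0 := by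
  have h := pvSplice_le a.reverse b.reverse (a.reverse.length + b.reverse.length) 0 0
    (by omega) (by omega) (by omega)
  rw [pvCell_zero_left] at h
  unfold pvSuf at h ⊢
  simp only [List.reverse_reverse, List.length_reverse, Nat.sub_zero] at h ⊢
  omega

-- existence: when both strings are nonempty, some forced pair attains the optimum
lemma pvEX' (a b : List Char) :
    ∀ k i j, i ≤ a.length → j ≤ b.length → (a.length - i) + (b.length - j) ≤ k →
      pvCell a b a.length b.length ≤ pvCell a b i j + pvSuf a b i j →
      (∃ i' j', i' < a.length ∧ j' < b.length ∧
        pvCell a b i' j' + pvD a b i' j' + pvSuf a b (i'+1) (j'+1)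
          = pvCell a b a.length b.length) ∨
      pvSuf a b i j = -((((a.length - i : Nat)) : Int) + (((b.length - j : Nat)) : Int)) := by
  intro k
  induction k with
  | zero =>
    intro i j hi hj hk _
    right
    have e1 : i = a.length := by omega
    subst e1
    rw [pvSuf_right, Nat.sub_self]
    simp
  | succ k ih =>
    intro i j hi hj hk hge
    by_cases hin : i = a.length
    · right; subst hin; rw [pvSuf_right, Nat.sub_self]; simp
    · by_cases hjm : j = b.length
      · right; subst hjm; rw [pvSuf_bottom, Nat.sub_self]; simp
      · have hi' : i < a.length := by omega
        have hj' : j < b.length := by omega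
        rcases pvMax3_cases (pvSuf a b (i+1) (j+1) + pvD a b i j)
          (pvSuf a b (i+1) j - 1) (pvSuf a b i (j+1) - 1) with h | h | h
        · -- diagonal: (i,j) is a witness
          left
          refine ⟨i, j, hi', hj', ?_⟩
          have hub := pvUB a b i j hi' hj'
          rw [pvSuf_rec a b i j hi' hj', h] at hge
          omega
        · -- gap in t: equality propagates to (i+1, j)
          have hstep := pvCell_step_down a b i j
          rw [pvSuf_rec a b i j hi' hj', h] at hge
          rcases ih (i+1) j (by omega) (by omega) (by omega) (by omega) with hl | hr
          · exact Or.inl hl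
          · right
            rw [pvSuf_rec a b i j hi' hj', h, hr]
            have : ((a.length - i : Nat) : Int) = ((a.length - (i+1) : Nat) : Int) + 1 := by omega
            omega
        · -- gap in s: equality propagates to (i, j+1)
          have hstep := pvCell_step_right a b i j
          rw [pvSuf_rec a b i j hi' hj', h] at hge
          rcases ih i (j+1) (by omega) (by omega) (by omega) (by omega) with hl | hr
          · exact Or.inl hl
          · right
            rw [pvSuf_rec a b i j hi' hj', h, hr]
            have : ((b.length - j : Nat) : Int) = ((b.length - (j+1) : Nat) : Int) + 1 := by omega
            omega

lemma pvEX (a b : List Char) (hn : 1 ≤ a.length) (hm : 1 ≤ b.length) :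
    ∃ i' j', i' < a.length ∧ j' < b.length ∧
      pvCell a b i' j' + pvD a b i' j' + pvSuf a b (i'+1) (j'+1)
        = pvCell a b a.length b.length := by
  have h0 : pvCell a b a.length b.length ≤ pvCell a b 0 0 + pvSuf a b 0 0 := by
    rw [pvCell_zero_left]
    have := pvSuf_zero_ge a b
    omega
  rcases pvEX' a b (a.length + b.length) 0 0 (by omega) (by omega) (by omega) h0 with h | h
  · exact h
  · exfalso
    -- a gap-only optimal path would score -(n+m), below the single-diagonal lower bound
    have hlow : -(((a.length - 1 : Nat) : Int) + ((b.length - 1 : Nat) : Int)) + (-1)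
        ≤ pvCell a b a.length b.length := by
      have hd := pvCell_step_diag a b (a.length - 1) (b.length - 1)
      rw [show (a.length - 1) + 1 = a.length by omega, show (b.length - 1) + 1 = b.length by omega] at hd
      have hg := pvCell_ge a b (a.length - 1) (b.length - 1)
      have hD := pvD_ge a b (a.length - 1) (b.length - 1)
      omega
    have hup := pvSuf_zero_ge a b
    rw [h] at hup
    simp only [Nat.sub_zero] at hup
    omega

-- ---------- foldl max facts ----------
lemma pvFoldlMax_le (L : List Int) (d c : Int) (hd : d ≤ c) (h : ∀ x ∈ L, x ≤ c) :
    L.foldl max d ≤ c := by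
  induction L generalizing d with
  | nil => exact hd
  | cons y t ih =>
    rw [List.foldl_cons]
    exact ih (max d y) (max_le hd (h y (by simp))) (fun x hx => h x (by simp [hx]))

lemma pvInit_le_foldlMax (L : List Int) (d : Int) : d ≤ L.foldl max d := by
  induction L generalizing d with
  | nil => exact le_rfl
  | cons y t ih =>
    rw [List.foldl_cons]
    exact le_trans (le_max_left d y) (ih (max d y))

lemma pvMem_le_foldlMax (L : List Int) (d x : Int) (hx : x ∈ L) : x ≤ L.foldl max d := by
  induction L generalizing d with
  | nil => cases hx
  | cons y t ih =>
    rw [List.foldl_cons]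
    rcases List.mem_cons.mp hx with rfl | hx'
    · exact le_trans (le_max_right d x) (pvInit_le_foldlMax t _)
    · exact ih _ hx'

lemma pvFoldlMax_eq (L : List Int) (d c : Int) (hd : d ≤ c) (h : ∀ x ∈ L, x ≤ c) (hc : c ∈ L) :
    L.foldl max d = c :=
  le_antisymm (pvFoldlMax_le L d c hd h) (pvMem_le_foldlMax L d c hc)

-- ---------- the per-pair scores ----------
def pvSc (a b : List Char) (i j : Nat) : Int :=
  pvMget (pvMat a b) ((i : Int)) ((j : Int))
    + (if PySem.List.pyGetD a ((i : Int)) ' ' == PySem.List.pyGetD b ((j : Int)) ' ' then 1 else -1)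
    + pvMget (pvMat a.reverse b.reverse) ((a.length : Int) - 1 - (i : Int)) ((b.length : Int) - 1 - (j : Int))

def pvScores (a b : List Char) : List Int :=
  (List.range a.length).flatMap (fun i => (List.range b.length).map (fun j => pvSc a b i j))

lemma pvSc_cell (a b : List Char) (i j : Nat) (hi : i < a.length) (hj : j < b.length) :
    pvSc a b i j = pvCell a b i j + pvD a b i j + pvSuf a b (i+1) (j+1) := by
  unfold pvSc
  rw [pvMget_val, pvVal_mat a b (by omega) (by omega),
      pvMget_int _ ((a.length : Int) - 1 - (i : Int)) ((b.length : Int) - 1 - (j : Int))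
        (a.length - 1 - i) (b.length - 1 - j) (by omega) (by omega),
      pvVal_mat a.reverse b.reverse (by rw [List.length_reverse]; omega) (by rw [List.length_reverse]; omega)]
  simp only [PySem.List.pyGetD_natCast]
  unfold pvSuf pvD
  rw [show a.length - (i+1) = a.length - 1 - i by omega,
      show b.length - (j+1) = b.length - 1 - j by omega]

lemma pvScores_mem (a b : List Char) (x : Int) :
    x ∈ pvScores a b ↔ ∃ i j, i < a.length ∧ j < b.length ∧ x = pvSc a b i j := by
  unfold pvScores
  simp only [List.mem_flatMap, List.mem_map, List.mem_range]
  constructor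
  · rintro ⟨i, hi, j, hj, rfl⟩
    exact ⟨i, j, hi, hj, rfl⟩
  · rintro ⟨i, j, hi, hj, rfl⟩
    exact ⟨i, hi, j, hj, rfl⟩

-- the key identity: the running max of all forced-pair scores is the last DP cell
lemma pvMaxEq (a b : List Char) :
    (pvScores a b).foldl max (-((a.length : Int) + (b.length : Int)))
      = pvCell a b a.length b.length := by
  by_cases hn : a.length = 0
  · have e : pvScores a b = [] := by unfold pvScores; rw [hn]; simp
    rw [e, List.foldl_nil, hn, pvCell_zero_left]
    simp
  · by_cases hm : b.length = 0
    · have e : pvScores a b = [] := by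
        unfold pvScores
        rw [hm]
        simp
      rw [e, List.foldl_nil, hm, pvCell_zero_right]
      simp
    · apply pvFoldlMax_eq
      · exact pvCell_ge a b a.length b.length
      · intro x hx
        rcases (pvScores_mem a b x).mp hx with ⟨i, j, hi, hj, rfl⟩
        rw [pvSc_cell a b i j hi hj]
        exact pvUB a b i j hi hj
      · rcases pvEX a b (by omega) (by omega) with ⟨i, j, hi, hj, he⟩
        rw [← he, ← pvSc_cell a b i j hi hj]
        exact (pvScores_mem a b _).2 ⟨i, j, hi, hj, rfl⟩

lemma pvFoldMax_eq (L : List Int) (d : Int) :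
    L.foldl (fun bb x => if x > bb then x else bb) d = L.foldl max d := by
  have e : (fun (bb x : Int) => if x > bb then x else bb) = fun bb x => max bb x := by
    funext bb x
    by_cases h : x > bb
    · rw [if_pos h, max_eq_right (le_of_lt h)]
    · rw [if_neg h, max_eq_left (not_lt.mp h)]
  rw [e]

lemma pvFoldG (a b : List Char) (i : Nat) (st : Int × Int) :
    List.foldl (fun (st : Int × Int) (j : Nat) =>
        (if pvSc a b i j > st.1 then pvSc a b i j else st.1, st.2 + pvSc a b i j)) st (List.range b.length)
      = List.foldl (fun (st : Int × Int) (x : Int) => (if x > st.1 then x else st.1, st.2 + x)) st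
          ((List.range b.length).map (fun j => pvSc a b i j)) := by
  rw [List.foldl_map]

lemma pvA_eq (s t : String) :
    align_to_symbols s t
      = ((pvScores s.toList t.toList).foldl max
           (-((s.toList.length : Int) + (t.toList.length : Int))),
         (pvScores s.toList t.toList).sum) := by
  have key : align_to_symbols s t
      = (PySem.List.pyRange 0 (PySem.List.len s.toList)).foldl (fun st i =>
          (PySem.List.pyRange 0 (PySem.List.len t.toList)).foldl (fun st j =>
            ((if pvMget (pvGlobalAlignment s.toList t.toList) i j
                + (if PySem.List.pyGetD s.toList i ' ' == PySem.List.pyGetD t.toList j ' ' then 1 else -1)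
                + pvMget (pvGlobalAlignment s.toList.reverse t.toList.reverse)
                    (PySem.List.len s.toList - 1 - i) (PySem.List.len t.toList - 1 - j) > st.1
              then pvMget (pvGlobalAlignment s.toList t.toList) i j
                + (if PySem.List.pyGetD s.toList i ' ' == PySem.List.pyGetD t.toList j ' ' then 1 else -1)
                + pvMget (pvGlobalAlignment s.toList.reverse t.toList.reverse)
                    (PySem.List.len s.toList - 1 - i) (PySem.List.len t.toList - 1 - j)
              else st.1),
             st.2 + (pvMget (pvGlobalAlignment s.toList t.toList) i j
                + (if PySem.List.pyGetD s.toList i ' ' == PySem.List.pyGetD t.toList j ' ' then 1 else -1)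
                + pvMget (pvGlobalAlignment s.toList.reverse t.toList.reverse)
                    (PySem.List.len s.toList - 1 - i) (PySem.List.len t.toList - 1 - j)))) st)
          (-(PySem.List.len s.toList + PySem.List.len t.toList), 0) := rfl
  rw [key, pvGlobalAlignment_eq, pvGlobalAlignment_eq]
  simp only [PySem.List.len_eq, PySem.List.pyRange_zero_nat, List.foldl_map]
  show List.foldl (fun (st : Int × Int) (i : Nat) =>
      List.foldl (fun (st : Int × Int) (j : Nat) =>
        (if pvSc s.toList t.toList i j > st.1 then pvSc s.toList t.toList i j else st.1,
         st.2 + pvSc s.toList t.toList i j)) st (List.range t.toList.length))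
    (-((s.toList.length : Int) + (t.toList.length : Int)), 0) (List.range s.toList.length) = _
  rw [show (fun (st : Int × Int) (i : Nat) =>
      List.foldl (fun (st : Int × Int) (j : Nat) =>
        (if pvSc s.toList t.toList i j > st.1 then pvSc s.toList t.toList i j else st.1,
         st.2 + pvSc s.toList t.toList i j)) st (List.range t.toList.length))
    = (fun (st : Int × Int) (i : Nat) =>
        List.foldl (fun (st : Int × Int) (x : Int) =>
          (if x > st.1 then x else st.1, st.2 + x)) st
          ((List.range t.toList.length).map (fun j => pvSc s.toList t.toList i j)))
    from funext fun st => funext fun i => pvFoldG s.toList t.toList i st]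
  rw [← List.foldl_flatMap]
  rw [show (List.range s.toList.length).flatMap
        (fun i => (List.range t.toList.length).map (fun j => pvSc s.toList t.toList i j))
      = pvScores s.toList t.toList from rfl]
  rw [PySem.List.foldl_prod_mk (f := fun bb x => if x > bb then x else bb)
        (g := fun acc x => acc + x)]
  rw [pvFoldMax_eq, PySem.List.foldl_add (g := fun x => x)]
  simp

-- ---------- B's aggregates ----------
lemma pvTakeMap {α : Type} (n : Nat) (f : Nat → α) :
    ((List.range (n+1)).map f).take n = (List.range n).map f := by
  rw [← List.map_take, List.take_range, show min n (n+1) = n by omega]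

lemma pvBoxSum (a b : List Char) :
    ((PySem.List.slice (pvMat a b) none (some ((a.length : Int)))).flatMap
      (fun row => PySem.List.slice row none (some ((b.length : Int))))).sum
    = ((List.range a.length).map
        (fun i => ((List.range b.length).map (fun j => pvCell a b i j)).sum)).sum := by
  rw [PySem.List.slice_to_natCast]
  unfold pvMat
  rw [pvTakeMap a.length (pvRow a b)]
  rw [List.flatMap_def, List.map_map]
  rw [List.map_congr_left (l := List.range a.length)
      (f := (fun row => PySem.List.slice row none (some ((b.length : Int)))) ∘ pvRow a b)
      (g := fun i => (List.range b.length).map (fun j => pvCell a b i j))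
      (by
        intro r _
        simp only [Function.comp_apply]
        rw [PySem.List.slice_to_natCast]
        unfold pvRow
        rw [pvTakeMap b.length (fun j => pvCell a b r j)])]
  rw [← List.flatMap_def, pvSum_flatMap]

lemma pvBoxSumRev (a b : List Char) :
    ((PySem.List.slice (pvMat a.reverse b.reverse) none (some ((a.length : Int)))).flatMap
      (fun row => PySem.List.slice row none (some ((b.length : Int))))).sum
    = ((List.range a.length).map
        (fun i => ((List.range b.length).map (fun j => pvCell a.reverse b.reverse i j)).sum)).sum := by
  rw [show ((a.length : Int)) = ((a.reverse.length : Int)) by rw [List.length_reverse],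
      show ((b.length : Int)) = ((b.reverse.length : Int)) by rw [List.length_reverse],
      pvBoxSum a.reverse b.reverse]
  simp only [List.length_reverse]

lemma pvCnt_map (a b : List Char) :
    a.map (fun ch => (b.foldl (fun (d : PySem.Dict Char Int) ch' => d.insert ch' (d.getD ch' 0 + 1))
        PySem.Dict.empty).getD ch 0)
      = a.map (fun ch => ((b.count ch : Nat) : Int)) := by
  apply List.map_congr_left
  intro ch _
  rw [PySem.Dict.getD_foldl_insert_add_one]
  simp

lemma pvBeq_comm (x y : Char) : (x == y) = (y == x) := by
  rw [Bool.eq_iff_iff]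
  simp [beq_iff_eq]
  exact eq_comm

lemma pvMatch_inner (a b : List Char) (i : Nat) :
    ((List.range b.length).map (fun j => pvD a b i j)).sum
      = 2 * ((b.count (a.getD i ' ') : Nat) : Int) - (b.length : Int) := by
  have e1 : (List.range b.length).map (fun j => pvD a b i j)
      = b.map (fun c => if a.getD i ' ' == c then (1:Int) else -1) := by
    conv_rhs => rw [← pvMap_getD_range b]
    rw [List.map_map]
    rfl
  have e2 : b.map (fun c => if a.getD i ' ' == c then (1:Int) else -1)
      = b.map (fun c => 2 * (if a.getD i ' ' == c then (1:Int) else 0) + (-1)) := by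
    apply List.map_congr_left
    intro c _
    cases h : a.getD i ' ' == c <;> simp [h]
  rw [e1, e2, PySem.List.sum_map_add_int]
  rw [show (fun c => 2 * (if a.getD i ' ' == c then (1:Int) else 0))
        = fun c => 2 * ((fun c => if a.getD i ' ' == c then (1:Int) else 0) c) from rfl,
      List.sum_map_mul_left]
  rw [PySem.List.sum_map_ite_one_zero (fun c => a.getD i ' ' == c) b]
  rw [PySem.List.sum_map_const_int]
  have e3 : b.countP (fun c => a.getD i ' ' == c) = b.count (a.getD i ' ') := by
    rw [List.count_eq_countP]
    apply List.countP_congr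
    intro c _
    rw [pvBeq_comm (a.getD i ' ') c]
  rw [e3]
  push_cast
  ring

lemma pvMatch_total (a b : List Char) :
    ((List.range a.length).map (fun i => ((List.range b.length).map (fun j => pvD a b i j)).sum)).sum
      = 2 * (a.map (fun ch => ((b.count ch : Nat) : Int))).sum - (a.length : Int) * (b.length : Int) := by
  rw [List.map_congr_left (fun i (_ : i ∈ List.range a.length) => pvMatch_inner a b i)]
  rw [show (fun i => 2 * ((b.count (a.getD i ' ') : Nat) : Int) - (b.length : Int))
        = fun i => 2 * ((b.count (a.getD i ' ') : Nat) : Int) + (-(b.length : Int)) from by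
      funext i; ring]
  rw [PySem.List.sum_map_add_int]
  rw [show (fun i => 2 * ((b.count (a.getD i ' ') : Nat) : Int))
        = fun i => 2 * ((fun i => ((b.count (a.getD i ' ') : Nat) : Int)) i) from rfl,
      List.sum_map_mul_left]
  rw [PySem.List.sum_map_const_int]
  have e4 : (List.range a.length).map (fun i => ((b.count (a.getD i ' ') : Nat) : Int))
      = a.map (fun ch => ((b.count ch : Nat) : Int)) := by
    conv_rhs => rw [← pvMap_getD_range a]
    rw [List.map_map]
    rfl
  rw [e4]
  simp only [List.length_range]
  push_cast
  ring

lemma pvQSum (a b : List Char) :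
    ((List.range a.length).map (fun i => ((List.range b.length).map (fun j =>
        pvCell a.reverse b.reverse (a.length - 1 - i) (b.length - 1 - j))).sum)).sum
      = ((List.range a.length).map (fun i => ((List.range b.length).map (fun j =>
        pvCell a.reverse b.reverse i j)).sum)).sum := by
  rw [List.map_congr_left (fun i (_ : i ∈ List.range a.length) =>
        pvSum_reflect b.length (fun j => pvCell a.reverse b.reverse (a.length - 1 - i) j))]
  exact pvSum_reflect a.length (fun i => ((List.range b.length).map (fun j =>
    pvCell a.reverse b.reverse i j)).sum)

lemma pvSc_cell' (a b : List Char) (i j : Nat) (hi : i < a.length) (hj : j < b.length) :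
    pvSc a b i j = pvCell a b i j + pvD a b i j
      + pvCell a.reverse b.reverse (a.length - 1 - i) (b.length - 1 - j) := by
  rw [pvSc_cell a b i j hi hj]
  unfold pvSuf
  rw [show a.length - (i+1) = a.length - 1 - i by omega,
      show b.length - (j+1) = b.length - 1 - j by omega]

lemma pvScores_sum (a b : List Char) :
    (pvScores a b).sum
      = ((List.range a.length).map (fun i => ((List.range b.length).map (fun j => pvCell a b i j)).sum)).sum
      + ((List.range a.length).map (fun i => ((List.range b.length).map (fun j =>
          pvCell a.reverse b.reverse i j)).sum)).sum
      + (2 * (a.map (fun ch => ((b.count ch : Nat) : Int))).sum - (a.length : Int) * (b.length : Int)) := by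
  unfold pvScores
  rw [pvSum_flatMap]
  rw [List.map_congr_left (l := List.range a.length)
      (f := fun i => ((List.range b.length).map (fun j => pvSc a b i j)).sum)
      (g := fun i => ((List.range b.length).map (fun j => pvCell a b i j)).sum
        + ((List.range b.length).map (fun j => pvD a b i j)).sum
        + ((List.range b.length).map (fun j =>
            pvCell a.reverse b.reverse (a.length - 1 - i) (b.length - 1 - j))).sum)
      (by
        intro i hi
        rw [List.mem_range] at hi
        show (List.map (fun j => pvSc a b i j) (List.range b.length)).sum
          = (List.map (fun j => pvCell a b i j) (List.range b.length)).sum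
            + (List.map (fun j => pvD a b i j) (List.range b.length)).sum
            + (List.map (fun j =>
                pvCell a.reverse b.reverse (a.length - 1 - i) (b.length - 1 - j)) (List.range b.length)).sum
        rw [List.map_congr_left (l := List.range b.length)
            (f := fun j => pvSc a b i j)
            (g := fun j => pvCell a b i j + pvD a b i j
              + pvCell a.reverse b.reverse (a.length - 1 - i) (b.length - 1 - j))
            (by
              intro j hj
              rw [List.mem_range] at hj
              exact pvSc_cell' a b i j hi hj)]
        rw [PySem.List.sum_map_add_int, PySem.List.sum_map_add_int])]
  rw [PySem.List.sum_map_add_int, PySem.List.sum_map_add_int]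
  rw [pvQSum a b, pvMatch_total a b]
  ring

lemma pvB_eq (s t : String) :
    align_to_symbols_alt s t
      = (pvCell s.toList t.toList s.toList.length t.toList.length,
         (pvScores s.toList t.toList).sum) := by
  have key : align_to_symbols_alt s t
      = (pvMget (pvDpRows s.toList t.toList) (PySem.List.len s.toList) (PySem.List.len t.toList),
        ((PySem.List.slice (pvDpRows s.toList t.toList) none (some (PySem.List.len s.toList))).flatMap
            (fun row => PySem.List.slice row none (some (PySem.List.len t.toList)))).sum
        + ((PySem.List.slice (pvDpRows s.toList.reverse t.toList.reverse) none
              (some (PySem.List.len s.toList))).flatMap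
            (fun row => PySem.List.slice row none (some (PySem.List.len t.toList)))).sum
        + 2 * (s.toList.map (fun ch =>
            (t.toList.foldl (fun (d : PySem.Dict Char Int) ch' => d.insert ch' (d.getD ch' 0 + 1))
              PySem.Dict.empty).getD ch 0)).sum
        - PySem.List.len s.toList * PySem.List.len t.toList) := rfl
  rw [key, pvDpRows_eq, pvDpRows_eq]
  simp only [PySem.List.len_eq]
  rw [Prod.mk.injEq]
  refine ⟨?_, ?_⟩
  · rw [pvMget_val, pvVal_mat s.toList t.toList le_rfl le_rfl]
  · rw [pvBoxSum s.toList t.toList, pvBoxSumRev s.toList t.toList, pvCnt_map s.toList t.toList,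
        pvScores_sum s.toList t.toList]
    ring

theorem align_to_symbols_agree (s t : String) : align_to_symbols s t = align_to_symbols_alt s t := by
  rw [pvA_eq, pvB_eq, pvMaxEq]

-- ===== VERDICT (by name: the statement is the Claim_ definition above) =====
theorem align_to_symbols_spec : Claim_equal_align_to_symbols := by
  intro s t _
  show _ = _
  exact align_to_symbols_agree s t
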